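-- pv_equiv track=rewrite | github.com/SeanAdams10/AdventOfCodePython | 2024/Day14/day_14.py | set_blocked
-- ===== SOURCE A (Python) =====
-- def set_blocked(width, height, buffer):
--     blocked = set()
--     for x in range(width):
--         for y in range(height):
--             if x + y <= width // (2+buffer):
--                 blocked.add((x,y))
--             if x >= width - width //(2+buffer) + y:
--                 blocked.add((x,y))
--
--     return blocked
-- ===== SOURCE B (Python) =====
-- def set_blocked(width, height, buffer):
--     blocked = set()
--     if width <= 0 or height <= 0:
--         return blocked
--     t = width // (2 + buffer)
--     for x in range(width):
--         for y in range(min(t - x + 1, height)):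
--             blocked.add((x, y))
--         for y in range(min(x - width + t + 1, height)):
--             blocked.add((x, y))
--     return blocked
-- ===== Notes on version B (the rewrite author's own statement) =====
-- stated objective: faster
-- what changed: Instead of scanning every (x,y) cell of the width x height grid and testing the two triangle conditions per cell, B computes the threshold once and, per column x, directly enumerates the two satisfying y-prefix ranges (min(t-x+1,height) and min(x-width+t+1,height)) and unions them into the set.
import Mathlib
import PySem

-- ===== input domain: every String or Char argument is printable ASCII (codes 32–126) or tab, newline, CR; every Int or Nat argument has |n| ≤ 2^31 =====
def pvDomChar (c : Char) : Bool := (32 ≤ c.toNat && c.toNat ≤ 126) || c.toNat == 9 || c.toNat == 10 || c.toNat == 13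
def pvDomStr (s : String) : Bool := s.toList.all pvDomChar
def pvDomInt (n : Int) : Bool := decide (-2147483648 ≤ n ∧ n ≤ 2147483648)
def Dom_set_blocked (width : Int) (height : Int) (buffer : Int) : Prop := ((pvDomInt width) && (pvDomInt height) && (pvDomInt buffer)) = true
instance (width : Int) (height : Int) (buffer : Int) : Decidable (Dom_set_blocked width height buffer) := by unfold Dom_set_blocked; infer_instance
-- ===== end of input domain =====

-- B replaces A's full width×height scan with direct enumeration of the two triangular
-- y-ranges per column (objective: faster — it skips the per-cell tests over the whole grid).

-- ===== PORT A =====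
def set_blocked (width : Int) (height : Int) (buffer : Int) : List (Int × Int) :=
  (PySem.List.pyRange 0 width 1).foldl (fun blocked x =>
    (PySem.List.pyRange 0 height 1).foldl (fun blocked y =>
      let blocked := if x + y ≤ PySem.Int.floordiv width (2 + buffer) then PySem.Set.add blocked (x, y) else blocked
      if x ≥ width - PySem.Int.floordiv width (2 + buffer) + y then PySem.Set.add blocked (x, y) else blocked)
      blocked) (PySem.Set.empty)

-- ===== PORT B =====
def set_blocked_alt (width : Int) (height : Int) (buffer : Int) : List (Int × Int) :=
  if width ≤ 0 ∨ height ≤ 0 then PySem.Set.empty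
  else
    let t := PySem.Int.floordiv width (2 + buffer)
    (PySem.List.pyRange 0 width 1).foldl (fun blocked x =>
      let blocked := (PySem.List.pyRange 0 (min (t - x + 1) height) 1).foldl
        (fun b y => PySem.Set.add b (x, y)) blocked
      (PySem.List.pyRange 0 (min (x - width + t + 1) height) 1).foldl
        (fun b y => PySem.Set.add b (x, y)) blocked) (PySem.Set.empty)

-- ===== PRECONDITION & SPEC =====
-- Pre_ excludes exactly the inputs where Python A raises ZeroDivisionError:
-- the division width // (2+buffer) is evaluated (inside the loops, so only when
-- width > 0 and height > 0) with buffer = -2.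
def Pre_set_blocked (width : Int) (height : Int) (buffer : Int) : Prop :=
  ¬ (0 < width ∧ 0 < height ∧ buffer = -2)
instance (width : Int) (height : Int) (buffer : Int) : Decidable (Pre_set_blocked width height buffer) := by unfold Pre_set_blocked; infer_instance
def pvWitness_set_blocked : Int × Int × Int := (7, 5, 0)
def Spec_set_blocked (width : Int) (height : Int) (buffer : Int) (out : List (Int × Int)) : Prop := out = set_blocked_alt width height buffer
instance (width : Int) (height : Int) (buffer : Int) (out : List (Int × Int)) : Decidable (Spec_set_blocked width height buffer out) := by unfold Spec_set_blocked; infer_instance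

-- ===== CLAIM (what is proved, stated in full; the proofs are below) =====
def Claim_equal_set_blocked : Prop := ∀ (width : Int) (height : Int) (buffer : Int), Dom_set_blocked width height buffer → Pre_set_blocked width height buffer → Spec_set_blocked width height buffer (set_blocked width height buffer)

-- ===== LEMMAS AND PROOFS =====
-- helper defs (proof-only)
def pvAddAll (s : PySem.Set (Int × Int)) (l : List (Int × Int)) : PySem.Set (Int × Int) :=
  l.foldl PySem.Set.add s

def pvYs (x : Int) (n : Nat) : List (Int × Int) :=
  (List.range n).map (fun (k : Nat) => ((x, (k : Int)) : Int × Int))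

theorem pvAddAll_append (s : PySem.Set (Int × Int)) (l1 l2 : List (Int × Int)) :
    pvAddAll s (l1 ++ l2) = pvAddAll (pvAddAll s l1) l2 := by
  simp [pvAddAll, List.foldl_append]

theorem pvMem_addAll {e : Int × Int} {s : PySem.Set (Int × Int)} {l : List (Int × Int)} :
    e ∈ pvAddAll s l ↔ e ∈ s ∨ e ∈ l := by
  induction l generalizing s with
  | nil => simp [pvAddAll]
  | cons a l ih =>
    simp only [pvAddAll, List.foldl_cons] at *
    rw [ih]
    simp [PySem.Set.mem_add]
    tauto

theorem pvAddAll_of_subset (s : PySem.Set (Int × Int)) (l : List (Int × Int))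
    (h : ∀ e ∈ l, e ∈ s) : pvAddAll s l = s := by
  induction l with
  | nil => rfl
  | cons a l ih =>
    have ha : a ∈ s := h a (by simp)
    simp only [pvAddAll, List.foldl_cons, PySem.Set.add_of_mem ha]
    exact ih (fun e he => h e (by simp [he]))

-- merging the two prefix runs of B's inner loops
theorem pvMerge (s : PySem.Set (Int × Int)) (x : Int) (a b : Nat) :
    pvAddAll (pvAddAll s (pvYs x a)) (pvYs x b) = pvAddAll s (pvYs x (max a b)) := by
  rcases le_or_gt b a with h | h
  · rw [max_eq_left h]
    apply pvAddAll_of_subset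
    intro e he
    rw [pvMem_addAll]
    right
    simp only [pvYs, List.mem_map, List.mem_range] at he ⊢
    rcases he with ⟨k, hk, rfl⟩
    exact ⟨k, lt_of_lt_of_le hk h, rfl⟩
  · rw [max_eq_right (le_of_lt h)]
    have hb : b = a + (b - a) := by omega
    rw [hb]
    have hsplit : pvYs x (a + (b - a)) = pvYs x a ++ (List.range (b - a)).map (fun (k : Nat) => ((x, ((a + k : Nat) : Int)) : Int × Int)) := by
      simp [pvYs, List.range_add, List.map_map, Function.comp_def]
    rw [hsplit, pvAddAll_append, pvAddAll_append]
    congr 1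
    apply pvAddAll_of_subset
    intro e he
    rw [pvMem_addAll]
    right
    exact he

-- A's two conditional adds collapse to one conditional add on the max bound
theorem pvBodyEq (x t w : Int) (b : PySem.Set (Int × Int)) (y : Int) :
    (if x ≥ w - t + y then
        PySem.Set.add (if x + y ≤ t then PySem.Set.add b (x, y) else b) (x, y)
      else (if x + y ≤ t then PySem.Set.add b (x, y) else b))
    = (if y ≤ max (t - x) (x - w + t) then PySem.Set.add b (x, y) else b) := by
  split_ifs with h1 h2 h3 h4 h5 <;> first
  | rfl
  | (exact PySem.Set.add_of_mem (by simp [PySem.Set.mem_add]))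
  | omega

-- fold of the single conditional add over range H
theorem pvSimpleFold (x M : Int) (H : Nat) (s : PySem.Set (Int × Int)) :
    (List.range H).foldl (fun (b : PySem.Set (Int × Int)) (k : Nat) => if (k : Int) ≤ M then PySem.Set.add b (x, (k : Int)) else b) s
    = pvAddAll s (pvYs x (min (M + 1) (H : Int)).toNat) := by
  induction H with
  | zero =>
    have h0 : (min (M + 1) ((0 : Nat) : Int)).toNat = 0 := by omega
    rw [h0]
    rfl
  | succ H ih =>
    rw [List.range_succ, List.foldl_append, ih]
    simp only [List.foldl_cons, List.foldl_nil]
    by_cases h : (H : Int) ≤ M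
    · have h1 : (min (M + 1) ((H : Nat) : Int)).toNat = H := by omega
      have h2 : (min (M + 1) ((H + 1 : Nat) : Int)).toNat = H + 1 := by push_cast; omega
      rw [if_pos h, h1, h2]
      have hy : pvYs x (H + 1) = pvYs x H ++ [(x, (H : Int))] := by
        simp [pvYs, List.range_succ]
      rw [hy, pvAddAll_append]
      rfl
    · have h12 : (min (M + 1) ((H + 1 : Nat) : Int)).toNat = (min (M + 1) ((H : Nat) : Int)).toNat := by
        push_cast; omega
      rw [if_neg h, h12]

-- B's single inner loop is pvAddAll of a prefix
theorem pvBInner (s : PySem.Set (Int × Int)) (x n : Int) :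
    (PySem.List.pyRange 0 n 1).foldl (fun b y => PySem.Set.add b (x, y)) s
    = pvAddAll s (pvYs x n.toNat) := by
  rw [PySem.List.pyRange_one]
  simp only [List.foldl_map, pvAddAll, pvYs, zero_add, Int.sub_zero]

-- A's inner loop (over range n) equals pvAddAll of the clamped prefix
theorem pvAInner (s : PySem.Set (Int × Int)) (x t w n : Int) :
    (PySem.List.pyRange 0 n 1).foldl (fun blocked y =>
        let blocked := if x + y ≤ t then PySem.Set.add blocked (x, y) else blocked
        if x ≥ w - t + y then PySem.Set.add blocked (x, y) else blocked) s
    = pvAddAll s (pvYs x (min (max (t - x) (x - w + t) + 1) n).toNat) := by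
  rw [PySem.List.pyRange_one]
  simp only [List.foldl_map, zero_add, Int.sub_zero]
  have hfun : (fun (b : PySem.Set (Int × Int)) (k : Nat) =>
      (fun blocked (y : Int) =>
        let blocked := if x + y ≤ t then PySem.Set.add blocked (x, y) else blocked
        if x ≥ w - t + y then PySem.Set.add blocked (x, y) else blocked) b ((k : Int)))
      = (fun (b : PySem.Set (Int × Int)) (k : Nat) => if ((k : Nat) : Int) ≤ max (t - x) (x - w + t) then PySem.Set.add b (x, ((k : Nat) : Int)) else b) := by
    funext b k
    exact pvBodyEq x t w b (k : Int)
  rw [hfun, pvSimpleFold]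
  have hc : (min (max (t - x) (x - w + t) + 1) ((n.toNat : Nat) : Int)).toNat
      = (min (max (t - x) (x - w + t) + 1) n).toNat := by omega
  rw [hc]

theorem pvFoldConst {α : Type} (s : PySem.Set (Int × Int)) (l : List α) :
    l.foldl (fun b (_ : α) => b) s = s := by
  induction l with
  | nil => rfl
  | cons a l ih => simp [ih]

-- ===== VERDICT =====
theorem set_blocked_spec : Claim_equal_set_blocked := by
  unfold Claim_equal_set_blocked
  intro w h buffer _ _
  unfold Spec_set_blocked set_blocked set_blocked_alt
  by_cases hg : w ≤ 0 ∨ h ≤ 0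
  · rw [if_pos hg]
    rcases hg with hw | hh
    · rw [PySem.List.pyRange_one_eq_nil hw]
      rfl
    · have hfun : (fun (blocked : PySem.Set (Int × Int)) (x : Int) =>
          (PySem.List.pyRange 0 h 1).foldl (fun blocked y =>
            let blocked := if x + y ≤ PySem.Int.floordiv w (2 + buffer) then PySem.Set.add blocked (x, y) else blocked
            if x ≥ w - PySem.Int.floordiv w (2 + buffer) + y then PySem.Set.add blocked (x, y) else blocked) blocked)
          = (fun (blocked : PySem.Set (Int × Int)) (_ : Int) => blocked) := by
        funext blocked x
        rw [PySem.List.pyRange_one_eq_nil hh]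
        rfl
      rw [hfun, pvFoldConst]
  · rw [if_neg hg]
    push Not at hg
    obtain ⟨hw, hh⟩ := hg
    set t := PySem.Int.floordiv w (2 + buffer) with ht
    have hfun : (fun (blocked : PySem.Set (Int × Int)) (x : Int) =>
        (PySem.List.pyRange 0 h 1).foldl (fun blocked y =>
          let blocked := if x + y ≤ t then PySem.Set.add blocked (x, y) else blocked
          if x ≥ w - t + y then PySem.Set.add blocked (x, y) else blocked) blocked)
        = (fun (blocked : PySem.Set (Int × Int)) (x : Int) =>
          (PySem.List.pyRange 0 (min (x - w + t + 1) h) 1).foldl (fun b y => PySem.Set.add b (x, y))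
            ((PySem.List.pyRange 0 (min (t - x + 1) h) 1).foldl (fun b y => PySem.Set.add b (x, y)) blocked)) := by
      funext blocked x
      rw [pvAInner, pvBInner, pvBInner, pvMerge]
      congr 2
      omega
    rw [hfun]
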